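-- pv_equiv track=rewrite | github.com/cdeust/Cortex | mcp_server/core/concept_emerger.py | _properties_from_claims
-- ===== SOURCE A (Python) =====
-- def _properties_from_claims(claims: list[dict]) -> dict[str, list[str]]:
--     """Extract a property set: claim_type → list of distinct text fingerprints."""
--     props: dict[str, list[str]] = {}
--     for c in claims:
--         ct = c.get("claim_type", "assertion")
--         # Fingerprint = first 80 chars (collapses near-duplicates)
--         fp = (c.get("text") or "").strip()[:80]
--         if not fp:
--             continue
--         props.setdefault(ct, [])
--         if fp not in props[ct]:
--             props[ct].append(fp)
--     return props
-- ===== SOURCE B (Python) =====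
-- def _properties_from_claims(claims: list[dict]) -> dict[str, list[str]]:
--     """Extract a property set: claim_type -> list of distinct text fingerprints."""
--     # Flatten to an ordered list of (claim_type, fingerprint) pairs, dropping empties.
--     pairs = []
--     for c in claims:
--         fp = (c.get("text") or "").strip()[:80]
--         if fp:
--             pairs.append((c.get("claim_type", "assertion"), fp))
--     # Order-preserving dedup of whole pairs, then regroup by type.
--     distinct = list(dict.fromkeys(pairs))
--     return {ct: [f for t, f in distinct if t == ct] for ct, _ in distinct}
-- ===== Notes on version B (the rewrite author's own statement) =====
-- stated objective: alternative
-- what changed: A builds the dict incrementally with setdefault plus an append-if-absent membership scan per claim; B first flattens the claims to an ordered flat list of (claim_type, fingerprint) pairs, dedups the whole pairs once with dict.fromkeys, and then regroups the deduped pairs into the result dict by filtering per type.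
import Mathlib
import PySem

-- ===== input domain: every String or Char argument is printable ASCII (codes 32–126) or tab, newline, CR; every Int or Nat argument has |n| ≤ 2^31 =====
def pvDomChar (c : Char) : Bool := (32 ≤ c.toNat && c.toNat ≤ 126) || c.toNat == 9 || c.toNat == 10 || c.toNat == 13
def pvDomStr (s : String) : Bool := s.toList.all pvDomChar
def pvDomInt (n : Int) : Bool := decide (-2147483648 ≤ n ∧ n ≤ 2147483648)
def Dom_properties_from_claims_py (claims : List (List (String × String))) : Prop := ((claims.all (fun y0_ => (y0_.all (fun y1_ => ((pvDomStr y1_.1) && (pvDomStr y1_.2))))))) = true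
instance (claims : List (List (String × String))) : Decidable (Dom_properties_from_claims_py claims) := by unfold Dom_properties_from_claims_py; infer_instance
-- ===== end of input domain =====

-- B replaces A's incremental dict building (setdefault + append-if-absent with a linear
-- membership scan per claim) by three staged passes: flatten to an ordered list of
-- (claim_type, fingerprint) pairs, dedup the whole pairs once, then regroup by type.
-- Same return value; alternative decomposition.

-- shared field accessor: c.get(k, dflt) (and `c.get("text") or ""` — all values are strings,
-- so `or ""` only replaces a missing key / empty string, which getD "" models exactly)
def pvGetD (c : List (String × String)) (k dflt : String) : String :=
  (PySem.Dict.ofList c).getD k dflt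

-- fp = (c.get("text") or "").strip()[:80]
def pvFp (c : List (String × String)) : String :=
  PySem.Str.slice (PySem.Str.strip (pvGetD c "text" "")) none (some 80)

-- ===== PORT A =====
-- one iteration of A's loop body
def pvStepA (d : PySem.Dict String (List String)) (c : List (String × String)) :
    PySem.Dict String (List String) :=
  let ct := pvGetD c "claim_type" "assertion"
  let fp := pvFp c
  if fp = "" then d
  else
    let d1 := d.setdefault ct []
    if fp ∈ d1.getD ct [] then d1
    else d1.modify ct [] (fun l => l ++ [fp])   -- props[ct].append(fp)

def properties_from_claims_py (claims : List (List (String × String))) : List (String × List String) :=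
  (claims.foldl pvStepA PySem.Dict.empty).items

-- ===== PORT B =====
-- pass 1: the ordered flat list of (claim_type, fingerprint) pairs, empty fps dropped
def pvPairs (claims : List (List (String × String))) : List (String × String) :=
  claims.foldl (fun acc c =>
    let fp := pvFp c
    if fp = "" then acc
    else acc ++ [(pvGetD c "claim_type" "assertion", fp)]) []

def properties_from_claims_py_alt (claims : List (List (String × String))) : List (String × List String) :=
  -- pass 2: distinct = list(dict.fromkeys(pairs))
  let distinct := PySem.List.dedup (pvPairs claims)
  -- pass 3: {ct: [f for t, f in distinct if t == ct] for ct, _ in distinct}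
  (distinct.foldl (fun d p =>
      d.insert p.1 ((distinct.filter (fun q => q.1 == p.1)).map (·.2)))
    PySem.Dict.empty).items

-- ===== PRECONDITION & SPEC =====
def Spec_properties_from_claims_py (claims : List (List (String × String))) (out : List (String × List String)) : Prop := out = properties_from_claims_py_alt claims
instance (claims : List (List (String × String))) (out : List (String × List String)) : Decidable (Spec_properties_from_claims_py claims out) := by unfold Spec_properties_from_claims_py; infer_instance

-- ===== CLAIM (what is proved, stated in full; the proofs are below) =====
def Claim_equal_properties_from_claims_py : Prop := ∀ (claims : List (List (String × String))), Dom_properties_from_claims_py claims → Spec_properties_from_claims_py claims (properties_from_claims_py claims)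

-- ===== LEMMAS AND PROOFS =====

-- pass 1 unrolled one claim from the right
theorem pvPairs_append (cs : List (List (String × String))) (c : List (String × String)) :
    pvPairs (cs ++ [c]) = if pvFp c = "" then pvPairs cs
      else pvPairs cs ++ [(pvGetD c "claim_type" "assertion", pvFp c)] := by
  simp [pvPairs, List.foldl_append]

theorem pvA_inv (cs : List (List (String × String))) :
    (cs.foldl pvStepA PySem.Dict.empty).keys
        = PySem.List.dedup ((pvPairs cs).map (·.1)) ∧
    ∀ k, (cs.foldl pvStepA PySem.Dict.empty).getD k []
        = PySem.List.dedup ((((pvPairs cs).filter (fun q => q.1 == k)).map (·.2))) := by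
  induction cs using List.reverseRecOn with
  | nil =>
      constructor
      · simp [pvPairs, PySem.Dict.keys_empty, PySem.List.dedup_eq_ofList, PySem.Set.ofList]
      · intro k; simp [pvPairs, PySem.Dict.getD_empty, PySem.List.dedup_eq_ofList, PySem.Set.ofList]
  | append_singleton cs c ih =>
      obtain ⟨ihk, ihv⟩ := ih
      rw [List.foldl_append, List.foldl_cons, List.foldl_nil, pvPairs_append]
      set d := cs.foldl pvStepA PySem.Dict.empty with hd
      set P := pvPairs cs with hP
      unfold pvStepA
      by_cases hfp : pvFp c = ""
      · simp only [if_pos hfp]; exact ⟨ihk, ihv⟩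
      · simp only [if_neg hfp]
        set ct := pvGetD c "claim_type" "assertion" with hct
        set fp := pvFp c with hfpd
        simp only [PySem.List.dedup_eq_ofList] at *
        by_cases hmem : ct ∈ P.map (·.1)
        · have hc : d.contains ct = true := by
            rw [PySem.Dict.contains_eq_decide_mem_keys, ihk]
            simp [PySem.Set.mem_ofList, hmem]
          rw [PySem.Dict.setdefault_of_contains _ _ hc]
          have hbucket := ihv ct
          by_cases hin : fp ∈ d.getD ct []
          · simp only [if_pos hin]
            have hfpmem : fp ∈ (List.filter (fun q => q.1 == ct) P).map (·.2) := by
              rw [hbucket, PySem.Set.mem_ofList] at hin; exact hin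
            constructor
            · rw [ihk, List.map_append, List.map_singleton,
                PySem.Set.ofList_append_singleton,
                PySem.Set.add_of_mem (by rw [PySem.Set.mem_ofList]; exact hmem)]
            · intro k
              rw [ihv k, List.filter_append]
              by_cases hk : ct = k
              · have hff : List.filter (fun q => q.1 == k) [(ct, fp)] = [(ct, fp)] := by
                  simp [hk]
                rw [hff, List.map_append, List.map_singleton, PySem.Set.ofList_append_singleton,
                  PySem.Set.add_of_mem (by rw [PySem.Set.mem_ofList]; exact hk ▸ hfpmem)]
              · have hff : List.filter (fun q => q.1 == k) [(ct, fp)] = [] := by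
                  simp; exact fun h => absurd h.symm (fun h2 => hk h2.symm)
                rw [hff, List.append_nil]
          · simp only [if_neg hin]
            constructor
            · rw [PySem.Dict.keys_modify, PySem.Dict.keys_insert_of_contains _ _ hc, ihk,
                List.map_append, List.map_singleton, PySem.Set.ofList_append_singleton,
                PySem.Set.add_of_mem (by rw [PySem.Set.mem_ofList]; exact hmem)]
            · intro k
              rw [PySem.Dict.getD_modify, List.filter_append]
              by_cases hk : k = ct
              · rw [if_pos hk, hk]
                have hff : List.filter (fun q => q.1 == ct) [(ct, fp)] = [(ct, fp)] := by simp
                rw [hff, hbucket, List.map_append, List.map_singleton,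
                  PySem.Set.ofList_append_singleton, PySem.Set.add_of_not_mem]
                rw [PySem.Set.mem_ofList]
                intro hc2
                exact hin (by rw [hbucket, PySem.Set.mem_ofList]; exact hc2)
              · rw [if_neg hk, ihv k]
                have hff : List.filter (fun q => q.1 == k) [(ct, fp)] = [] := by
                  simp; exact fun h => absurd h.symm hk
                rw [hff, List.append_nil]
        · have hc : d.contains ct = false := by
            rw [PySem.Dict.contains_eq_decide_mem_keys, ihk]
            simp only [decide_eq_false_iff_not, PySem.Set.mem_ofList]
            exact hmem
          rw [PySem.Dict.setdefault_of_not_contains _ _ hc]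
          have hget : (d.insert ct []).getD ct ([] : List String) = [] :=
            PySem.Dict.getD_insert_self _ _ _ _
          have hnin : ¬ fp ∈ (d.insert ct []).getD ct ([] : List String) := by
            rw [hget]; exact List.not_mem_nil
          simp only [if_neg hnin]
          have hfilP : List.filter (fun q => q.1 == ct) P = [] := by
            refine List.filter_eq_nil_iff.mpr (fun q hq => ?_)
            simp only [beq_iff_eq]
            exact fun h => hmem (h ▸ List.mem_map_of_mem hq)
          constructor
          · rw [PySem.Dict.keys_modify,
              PySem.Dict.keys_insert_of_contains _ _ (PySem.Dict.contains_insert_self _ _ _),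
              PySem.Dict.keys_insert_of_not_contains _ _ hc, ihk,
              List.map_append, List.map_singleton, PySem.Set.ofList_append_singleton,
              PySem.Set.add_of_not_mem (by rw [PySem.Set.mem_ofList]; exact hmem)]
          · intro k
            rw [PySem.Dict.getD_modify, List.filter_append]
            by_cases hk : k = ct
            · rw [if_pos hk, hk, hget, hfilP]
              have hff : List.filter (fun q => q.1 == ct) [(ct, fp)] = [(ct, fp)] := by simp
              rw [hff]
              rfl
            · rw [if_neg hk, PySem.Dict.getD_insert, if_neg hk, ihv k]
              have hff : List.filter (fun q => q.1 == k) [(ct, fp)] = [] := by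
                simp; exact fun h => absurd h.symm hk
              rw [hff, List.append_nil]

theorem pvB_fold (l : List (String × String)) (v : String → List String)
    (d : PySem.Dict String (List String)) (pre : List String)
    (hk : d.keys = PySem.List.dedup pre)
    (hv : ∀ k ∈ d.keys, d.getD k [] = v k) :
    (l.foldl (fun d p => d.insert p.1 (v p.1)) d).keys
        = PySem.List.dedup (pre ++ l.map (·.1)) ∧
    ∀ k ∈ (l.foldl (fun d p => d.insert p.1 (v p.1)) d).keys,
        (l.foldl (fun d p => d.insert p.1 (v p.1)) d).getD k [] = v k := by
  induction l generalizing d pre with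
  | nil => simpa using ⟨hk, hv⟩
  | cons p l ih =>
      simp only [List.foldl_cons]
      have hmem : p.1 ∈ d.keys ↔ p.1 ∈ pre := by
        rw [hk]; simp [PySem.List.dedup_eq_ofList, PySem.Set.mem_ofList]
      have hk1 : (d.insert p.1 (v p.1)).keys = PySem.List.dedup (pre ++ [p.1]) := by
        simp only [PySem.List.dedup_eq_ofList] at *
        rw [PySem.Set.ofList_append_singleton]
        by_cases hp : p.1 ∈ pre
        · rw [PySem.Dict.keys_insert_of_contains _ _
            (by rw [PySem.Dict.contains_eq_decide_mem_keys]; simp [hmem.mpr hp]), hk,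
            PySem.Set.add_of_mem (by rw [PySem.Set.mem_ofList]; exact hp)]
        · rw [PySem.Dict.keys_insert_of_not_contains _ _
            (by rw [PySem.Dict.contains_eq_decide_mem_keys]
                simp only [decide_eq_false_iff_not]
                exact fun h => hp (hmem.mp h)), hk,
            PySem.Set.add_of_not_mem (by rw [PySem.Set.mem_ofList]; exact hp)]
      have hv1 : ∀ k ∈ (d.insert p.1 (v p.1)).keys, (d.insert p.1 (v p.1)).getD k [] = v k := by
        intro k hkm
        rw [PySem.Dict.getD_insert]
        by_cases hkp : k = p.1
        · rw [if_pos hkp, hkp]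
        · rw [if_neg hkp]
          rcases (PySem.Dict.mem_keys_insert _ _ _ _).mp hkm with h | h
          · exact absurd h hkp
          · exact hv k h
      have := ih (d.insert p.1 (v p.1)) (pre ++ [p.1]) hk1 hv1
      simpa [List.append_assoc] using this

theorem pvB_items (l : List (String × String)) (v : String → List String) :
    (l.foldl (fun d p => d.insert p.1 (v p.1)) (PySem.Dict.empty : PySem.Dict String (List String))).items
      = (PySem.List.dedup (l.map (·.1))).map (fun k => (k, v k)) := by
  obtain ⟨hk, hv⟩ := pvB_fold l v PySem.Dict.empty []
    (by simp [PySem.List.dedup_eq_ofList, PySem.Set.ofList]) (by simp)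
  have hnd : (l.foldl (fun d p => d.insert p.1 (v p.1)) (PySem.Dict.empty : PySem.Dict String (List String))).keys.Nodup := by
    rw [hk]; simp [PySem.Set.nodup_ofList]
  have hk' : (l.foldl (fun d p => d.insert p.1 (v p.1)) (PySem.Dict.empty : PySem.Dict String (List String))).keys
      = PySem.List.dedup (l.map (·.1)) := by simpa using hk
  rw [PySem.Dict.items_eq_map_keys _ hnd [], hk']
  refine List.map_congr_left (fun k hkm => ?_)
  rw [hv k (by rw [hk']; exact hkm)]

theorem pv_dedup_fst (P : List (String × String)) :
    PySem.List.dedup ((PySem.List.dedup P).map (·.1))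
      = PySem.List.dedup (P.map (·.1)) := by
  induction P using List.reverseRecOn with
  | nil => rfl
  | append_singleton P p ih =>
      simp only [PySem.List.dedup_eq_ofList] at *
      rw [PySem.Set.ofList_append_singleton, List.map_append, List.map_singleton,
        PySem.Set.ofList_append_singleton]
      by_cases hp : p ∈ P
      · rw [PySem.Set.add_of_mem (by simpa [PySem.Set.mem_ofList] using hp), ih,
          PySem.Set.add_of_mem (by rw [PySem.Set.mem_ofList]; exact List.mem_map_of_mem hp)]
      · rw [PySem.Set.add_of_not_mem (by simpa [PySem.Set.mem_ofList] using hp),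
          List.map_append, List.map_singleton, PySem.Set.ofList_append_singleton, ih]

theorem pv_dedup_filter (P : List (String × String)) (k : String) :
    ((PySem.List.dedup P).filter (fun q => q.1 == k)).map (·.2)
      = PySem.List.dedup ((P.filter (fun q => q.1 == k)).map (·.2)) := by
  induction P using List.reverseRecOn with
  | nil => rfl
  | append_singleton P p ih =>
      simp only [PySem.List.dedup_eq_ofList] at *
      rw [PySem.Set.ofList_append_singleton, List.filter_append]
      by_cases hpk : p.1 = k
      · have hf : List.filter (fun q => q.1 == k) [p] = [p] := by simp [hpk]
        rw [hf, List.map_append, List.map_singleton, PySem.Set.ofList_append_singleton]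
        by_cases hp : p ∈ P
        · rw [PySem.Set.add_of_mem (by simpa [PySem.Set.mem_ofList] using hp), ih,
            PySem.Set.add_of_mem]
          simp only [PySem.Set.mem_ofList, List.mem_map, List.mem_filter]
          exact ⟨p, ⟨hp, by simp [hpk]⟩, rfl⟩
        · rw [PySem.Set.add_of_not_mem (by simpa [PySem.Set.mem_ofList] using hp),
            List.filter_append, hf, List.map_append, List.map_singleton, ih,
            PySem.Set.add_of_not_mem]
          simp only [PySem.Set.mem_ofList, List.mem_map, List.mem_filter]
          rintro ⟨q, ⟨hq, hqk⟩, hq2⟩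
          exact hp (by have : q = p := Prod.ext (by simpa [hpk] using hqk) hq2; exact this ▸ hq)
      · have hf : List.filter (fun q => q.1 == k) [p] = [] := by simp [hpk]
        rw [hf, List.append_nil]
        by_cases hp : p ∈ P
        · rw [PySem.Set.add_of_mem (by simpa [PySem.Set.mem_ofList] using hp), ih]
        · rw [PySem.Set.add_of_not_mem (by simpa [PySem.Set.mem_ofList] using hp),
            List.filter_append, hf, List.append_nil, ih]

-- ===== VERDICT (by name: the statement is the Claim_ definition above) =====
theorem properties_from_claims_py_spec : Claim_equal_properties_from_claims_py := by
  intro claims _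
  unfold Spec_properties_from_claims_py properties_from_claims_py properties_from_claims_py_alt
  obtain ⟨hk, hv⟩ := pvA_inv claims
  have hnd : (claims.foldl pvStepA PySem.Dict.empty).keys.Nodup := by
    rw [hk]; simp [PySem.Set.nodup_ofList]
  have hB := pvB_items (PySem.List.dedup (pvPairs claims))
    (fun k => ((PySem.List.dedup (pvPairs claims)).filter (fun q => q.1 == k)).map (·.2))
  rw [PySem.Dict.items_eq_map_keys _ hnd []]
  simp only [hB, pv_dedup_fst, hk]
  exact List.map_congr_left (fun k _ => by rw [hv k, pv_dedup_filter])
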